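-- pv_equiv track=rewrite | github.com/Computational-Rare-Disease-Genomics-WHG/smORF_EP | smorfep/utils/functions.py | nt2aaMAP
-- ===== SOURCE A (Python) =====
-- def nt2aaMAP(sequence):
--     """
--         This function creates the index map from nucleotides sequence to aminoacid seqeunce.
--         So, nucleotides 1,2,3 have corresponds to the first aminoacid so all have index 0.
--     """
--     nt_aa = {}
--
--     index_aa = 0
--
--     for i in range(0,len(sequence)):
--         real_nt = i+1 ## because index starts at 0 -- nt 3 will be index 2, nt 6 -> index 5, ...
--
--         if real_nt % 3 == 0 and i != 0: ## per 3 nts we pass for next aminoacid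
--             nt_aa[i] = index_aa
--             index_aa += 1 ## next aa
--         else:
--             nt_aa[i] = index_aa
--
--     return nt_aa
-- ===== SOURCE B (Python) =====
-- def nt2aaMAP(sequence):
--     """Index map nucleotide->aminoacid, built codon by codon: for each
--     amino-acid index aa, the three nucleotide positions 3*aa+j map to aa."""
--     n = len(sequence)
--     nt_aa = {}
--     for aa in range((n + 2) // 3):
--         for j in range(3):
--             pos = 3 * aa + j
--             if pos < n:
--                 nt_aa[pos] = aa
--     return nt_aa
-- ===== Notes on version B (the rewrite author's own statement) =====
-- stated objective: alternative
-- what changed: B builds the map codon-by-codon (outer loop over amino-acid indices, inner loop over the 3 positions of each codon, with the trailing partial codon handled by the pos<n guard) instead of A's flat scan over all positions with a running amino-acid counter incremented on every third position.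
import Mathlib
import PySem

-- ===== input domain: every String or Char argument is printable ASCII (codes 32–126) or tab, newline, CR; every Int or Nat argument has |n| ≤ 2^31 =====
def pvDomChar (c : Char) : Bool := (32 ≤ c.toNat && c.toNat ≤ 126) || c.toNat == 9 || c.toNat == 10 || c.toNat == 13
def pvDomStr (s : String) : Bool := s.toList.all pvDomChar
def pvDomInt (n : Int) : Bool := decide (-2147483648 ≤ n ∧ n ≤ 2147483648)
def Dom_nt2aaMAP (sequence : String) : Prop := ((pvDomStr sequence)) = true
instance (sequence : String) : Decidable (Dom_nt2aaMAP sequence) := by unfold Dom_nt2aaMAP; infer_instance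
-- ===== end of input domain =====

-- B builds the same nucleotide→aminoacid index map codon-by-codon (outer loop over
-- amino-acid indices, inner loop over the 3 codon positions) instead of A's flat scan
-- with a running counter; objective: alternative decomposition, same cost.

-- ===== PORT A =====
def nt2aaMAP (sequence : String) : List (Int × Int) :=
  (((PySem.List.pyRange 0 (PySem.Str.len sequence) 1).foldl
      (fun (st : PySem.Dict Int Int × Int) i =>
        let real_nt := i + 1
        if PySem.Int.mod real_nt 3 == 0 && i != 0 then
          (st.1.insert i st.2, st.2 + 1)
        else
          (st.1.insert i st.2, st.2))
      (PySem.Dict.empty, 0)).1).items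

-- ===== PORT B =====
def nt2aaMAP_alt (sequence : String) : List (Int × Int) :=
  let n : Int := PySem.Str.len sequence
  ((PySem.List.pyRange 0 (PySem.Int.floordiv (n + 2) 3) 1).foldl
      (fun (d : PySem.Dict Int Int) aa =>
        (PySem.List.pyRange 0 3 1).foldl
          (fun (d : PySem.Dict Int Int) j =>
            let pos := 3 * aa + j
            if pos < n then d.insert pos aa else d)
          d)
      PySem.Dict.empty).items

-- ===== PRECONDITION & SPEC =====
def Spec_nt2aaMAP (sequence : String) (out : List (Int × Int)) : Prop := out = nt2aaMAP_alt sequence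
instance (sequence : String) (out : List (Int × Int)) : Decidable (Spec_nt2aaMAP sequence out) := by unfold Spec_nt2aaMAP; infer_instance

-- ===== CLAIM (what is proved, stated in full; the proofs are below) =====
def Claim_equal_nt2aaMAP : Prop := ∀ (sequence : String), Dom_nt2aaMAP sequence → Spec_nt2aaMAP sequence (nt2aaMAP sequence)

-- ===== LEMMAS AND PROOFS =====

-- the common normal form: the entry list [(i, i/3) for i in range k]
def pvT (k : Nat) : List (Int × Int) :=
  (List.range k).map (fun i : Nat => ((i : Int), ((i / 3 : Nat) : Int)))

-- flat entry list B produces: codons, each filtered to positions < n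
def pvE (n : Int) (m : Nat) : List (Int × Int) :=
  (List.range m).flatMap (fun aa =>
    [((3 * aa : Int), (aa : Int)), ((3 * aa : Int) + 1, (aa : Int)), ((3 * aa : Int) + 2, (aa : Int))].filter
      (fun p => decide (p.1 < n)))

lemma pvT_succ (k : Nat) :
    pvT (k + 1) = pvT k ++ [((k : Int), ((k / 3 : Nat) : Int))] := by
  simp [pvT, List.range_succ]

lemma A_loop (n : Nat) (d : PySem.Dict Int Int) (a : Int) :
    (PySem.List.pyRange 0 (n : Int) 1).foldl
      (fun (st : PySem.Dict Int Int × Int) i =>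
        let real_nt := i + 1
        if PySem.Int.mod real_nt 3 == 0 && i != 0 then
          (st.1.insert i st.2, st.2 + 1)
        else
          (st.1.insert i st.2, st.2))
      (d, a)
    = (((List.range n).map (fun i : Nat => ((i : Int), a + ((i / 3 : Nat) : Int)))).foldl
        (fun d' (p : Int × Int) => d'.insert p.1 p.2) d,
       a + ((n / 3 : Nat) : Int)) := by
  induction n with
  | zero => simp
  | succ n ih =>
    have hcast : ((n + 1 : Nat) : Int) = (n : Int) + 1 := by push_cast; ring
    rw [hcast, PySem.List.pyRange_one_succ_right (by positivity), List.foldl_append, ih]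
    rw [List.range_succ, List.map_append, List.foldl_append]
    simp only [List.map_cons, List.map_nil, List.foldl_cons, List.foldl_nil]
    have hmod : PySem.Int.mod ((n : Int) + 1) 3 = (((n + 1) % 3 : Nat) : Int) := by
      rw [← hcast]; exact_mod_cast PySem.Int.mod_natCast (n + 1) 3
    by_cases h3 : (n + 1) % 3 = 0
    · have hn : n ≠ 0 := by omega
      have hdiv : (n + 1) / 3 = n / 3 + 1 := by omega
      have hd : (3 : Int) ∣ (n : Int) + 1 := by omega
      simp [hn, hdiv, hd, add_assoc]
    · have hdiv : (n + 1) / 3 = n / 3 := by omega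
      have hd : ¬ (3 : Int) ∣ (n : Int) + 1 := by omega
      simp [hdiv, hd]

lemma items_pvT (k : Nat) :
    ((pvT k).foldl (fun (d : PySem.Dict Int Int) (p : Int × Int) => d.insert p.1 p.2)
        PySem.Dict.empty).items = pvT k := by
  have h := PySem.Dict.items_foldl_insert_fresh (l := pvT k)
      (k := fun p => p.1) (v := fun p => p.2) (d := (PySem.Dict.empty : PySem.Dict Int Int))
      (by intro p _; simp [PySem.Dict.contains_empty])
      (by
        have h1 : (pvT k).map (fun p => p.1) = (List.range k).map (fun i : Nat => (i : Int)) := by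
          rw [pvT, List.map_map]; rfl
        rw [h1]
        exact (List.nodup_range).map (fun a b h => by exact_mod_cast h))
  simpa using h

lemma B_loop (m : Nat) (n : Int) (d : PySem.Dict Int Int) :
    (PySem.List.pyRange 0 (m : Int) 1).foldl
      (fun (d : PySem.Dict Int Int) aa =>
        (PySem.List.pyRange 0 3 1).foldl
          (fun (d : PySem.Dict Int Int) j =>
            let pos := 3 * aa + j
            if pos < n then d.insert pos aa else d)
          d)
      d
    = (pvE n m).foldl (fun (d : PySem.Dict Int Int) (p : Int × Int) => d.insert p.1 p.2) d := by
  induction m generalizing d with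
  | zero => simp [pvE]
  | succ m ih =>
    have hcast : ((m + 1 : Nat) : Int) = (m : Int) + 1 := by push_cast; ring
    have hE : pvE n (m + 1) = pvE n m ++
        ([((3 * m : Int), (m : Int)), ((3 * m : Int) + 1, (m : Int)), ((3 * m : Int) + 2, (m : Int))].filter
          (fun p => decide (p.1 < n))) := by
      simp [pvE, List.range_succ]
    rw [hcast, PySem.List.pyRange_one_succ_right (by positivity), List.foldl_append, ih, hE,
      List.foldl_append]
    have h3 : PySem.List.pyRange 0 3 1 = [0, 1, 2] := by decide
    rw [h3]
    simp only [List.foldl_cons, List.foldl_nil, List.filter]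
    by_cases h0 : 3 * (m : Int) < n <;> by_cases h1 : 3 * (m : Int) + 1 < n <;>
      by_cases h2 : 3 * (m : Int) + 2 < n <;>
      simp [h0, h1, h2]

lemma pvE_eq_min (n m : Nat) : pvE (n : Int) m = pvT (min n (3 * m)) := by
  induction m with
  | zero => simp [pvE, pvT]
  | succ m ih =>
    have hE : pvE (n : Int) (m + 1) = pvE (n : Int) m ++
        ([((3 * m : Int), (m : Int)), ((3 * m : Int) + 1, (m : Int)), ((3 * m : Int) + 2, (m : Int))].filter
          (fun p => decide (p.1 < (n : Int)))) := by
      simp [pvE, List.range_succ]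
    rw [hE, ih]
    have e0 : ((3 * m : Int) < (n : Int)) ↔ 3 * m < n := by exact_mod_cast Iff.rfl
    have e1 : ((3 * m : Int) + 1 < (n : Int)) ↔ 3 * m + 1 < n := by exact_mod_cast Iff.rfl
    have e2 : ((3 * m : Int) + 2 < (n : Int)) ↔ 3 * m + 2 < n := by exact_mod_cast Iff.rfl
    rcases Nat.lt_or_ge (3 * m) n with hlt | hge
    · rcases Nat.lt_or_ge (3 * m + 1) n with hlt1 | hge1
      · rcases Nat.lt_or_ge (3 * m + 2) n with hlt2 | hge2
        · -- full codon fits: n ≥ 3m+3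
          have hmin1 : min n (3 * m) = 3 * m := by omega
          have hmin2 : min n (3 * (m + 1)) = 3 * m + 3 := by omega
          rw [hmin1, hmin2]
          rw [show 3 * m + 3 = (3 * m + 2) + 1 by ring, pvT_succ,
            show 3 * m + 2 = (3 * m + 1) + 1 by ring, pvT_succ,
            show 3 * m + 1 = (3 * m) + 1 by ring, pvT_succ]
          have d0 : (3 * m) / 3 = m := by omega
          have d1 : (3 * m + 1) / 3 = m := by omega
          have d2 : (3 * m + 2) / 3 = m := by omega
          simp [List.filter, e0.mpr hlt, e1.mpr hlt1, e2.mpr hlt2, d0, d1, d2]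
          omega
        · -- n = 3m+2
          have hn : n = 3 * m + 2 := by omega
          have hmin1 : min n (3 * m) = 3 * m := by omega
          have hmin2 : min n (3 * (m + 1)) = 3 * m + 2 := by omega
          rw [hmin1, hmin2,
            show 3 * m + 2 = (3 * m + 1) + 1 by ring, pvT_succ,
            show 3 * m + 1 = (3 * m) + 1 by ring, pvT_succ]
          have d0 : (3 * m) / 3 = m := by omega
          have d1 : (3 * m + 1) / 3 = m := by omega
          have h2' : ¬ ((3 * m : Int) + 2 < (n : Int)) := by rw [e2]; omega
          simp [List.filter, e0.mpr hlt, e1.mpr hlt1, h2', d0, d1]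
      · -- n = 3m+1
        have hmin1 : min n (3 * m) = 3 * m := by omega
        have hmin2 : min n (3 * (m + 1)) = 3 * m + 1 := by omega
        rw [hmin1, hmin2, show 3 * m + 1 = (3 * m) + 1 by ring, pvT_succ]
        have d0 : (3 * m) / 3 = m := by omega
        have h1' : ¬ ((3 * m : Int) + 1 < (n : Int)) := by rw [e1]; omega
        have h2' : ¬ ((3 * m : Int) + 2 < (n : Int)) := by rw [e2]; omega
        simp [List.filter, e0.mpr hlt, h1', h2', d0]
    · -- codon entirely past the end: nothing added
      have hmin : min n (3 * (m + 1)) = min n (3 * m) := by omega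
      have h0' : ¬ ((3 * m : Int) < (n : Int)) := by rw [e0]; omega
      have h1' : ¬ ((3 * m : Int) + 1 < (n : Int)) := by rw [e1]; omega
      have h2' : ¬ ((3 * m : Int) + 2 < (n : Int)) := by rw [e2]; omega
      simp [List.filter, h0', h1', h2', hmin]

lemma A_eq_pvT (sequence : String) : nt2aaMAP sequence = pvT sequence.toList.length := by
  unfold nt2aaMAP
  have hlen : PySem.Str.len sequence = (sequence.toList.length : Int) := by
    simp [PySem.Str.len_eq]
  rw [hlen, A_loop sequence.toList.length PySem.Dict.empty 0]
  simp only [zero_add]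
  exact items_pvT _

lemma B_eq_pvT (sequence : String) : nt2aaMAP_alt sequence = pvT sequence.toList.length := by
  unfold nt2aaMAP_alt
  have hlen : PySem.Str.len sequence = (sequence.toList.length : Int) := by
    simp [PySem.Str.len_eq]
  set N := sequence.toList.length with hN
  have hfd : PySem.Int.floordiv ((N : Int) + 2) 3 = (((N + 2) / 3 : Nat) : Int) := by
    have : ((N : Int) + 2) = ((N + 2 : Nat) : Int) := by push_cast; ring
    rw [this]; exact_mod_cast PySem.Int.floordiv_natCast (N + 2) 3
  simp only [hlen, hfd]
  rw [B_loop ((N + 2) / 3) (N : Int) PySem.Dict.empty, pvE_eq_min]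
  have : min N (3 * ((N + 2) / 3)) = N := by omega
  rw [this]
  exact items_pvT N

-- ===== VERDICT (by name: the statement is the Claim_ definition above) =====
theorem nt2aaMAP_spec : Claim_equal_nt2aaMAP := by
  intro sequence _
  unfold Spec_nt2aaMAP
  rw [A_eq_pvT, B_eq_pvT]
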